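-- pv_equiv track=rewrite | github.com/Dhruvmehta18/gfg_coding_problems | Strings/leftMostRepeatingChararcters.py | leftRepeatChar
-- ===== SOURCE A (Python) =====
-- def leftRepeatChar(s: str)->int:
--     temp = [0]*256
--     tempIndex = [-1]*256
--     i=0
--     for c in s:
--         ci = ord(c)
--         if temp[ci]<=2:
--             if temp[ci] == 0:
--                 tempIndex[ci] = i
--             temp[ci] += 1
--         i += 1
--     for j in range(256):
--         if temp[j]==2:
--             return tempIndex[j]
--
--     return -1
-- ===== SOURCE B (Python) =====
-- def leftRepeatChar(s: str) -> int:
--     # Walk the distinct characters in ascending order; for each, probe its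
--     # occurrences directly with str.find: the first character that has a second
--     # occurrence but no third one is the answer, and its first find() is the index.
--     for c in sorted(set(s)):
--         i = s.find(c)
--         j = s.find(c, i + 1)
--         if j != -1 and s.find(c, j + 1) == -1:
--             return i
--     return -1
-- ===== Notes on version B (the rewrite author's own statement) =====
-- stated objective: alternative
-- what changed: B keeps no frequency table at all: instead of A's counting pass over s into 256-slot count/first-index arrays followed by a range(256) scan, B iterates the distinct characters in ascending order and decides multiplicity two for each candidate by probing its first, second and third occurrence with str.find with start offsets, returning the first probe's index.
import Mathlib
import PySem

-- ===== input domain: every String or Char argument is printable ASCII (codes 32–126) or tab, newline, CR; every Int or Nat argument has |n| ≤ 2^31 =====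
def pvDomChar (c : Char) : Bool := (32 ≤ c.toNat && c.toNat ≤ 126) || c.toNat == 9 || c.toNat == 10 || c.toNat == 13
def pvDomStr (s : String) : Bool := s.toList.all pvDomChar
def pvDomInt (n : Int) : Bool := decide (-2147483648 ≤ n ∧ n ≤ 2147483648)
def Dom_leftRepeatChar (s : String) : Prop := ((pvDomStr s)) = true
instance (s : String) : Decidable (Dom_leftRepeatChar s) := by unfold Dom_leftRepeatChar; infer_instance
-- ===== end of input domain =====

-- B keeps no frequency table: it walks the distinct characters in ascending order and
-- probes first/second/third occurrence of each with str.find — objective: alternative.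

-- ===== PORT A =====
-- one step of A's 'for c in s' loop; state = (temp, tempIndex, i)
def leftRepeatStep (st : List Int × List Int × Int) (c : Char) : List Int × List Int × Int :=
  let ci : Int := (c.toNat : Int)
  if PySem.List.pyGetD st.1 ci 0 ≤ 2 then
    let ti' := if PySem.List.pyGetD st.1 ci 0 = 0 then PySem.List.pySetD st.2.1 ci st.2.2 else st.2.1
    (PySem.List.pySetD st.1 ci (PySem.List.pyGetD st.1 ci 0 + 1), ti', st.2.2 + 1)
  else (st.1, st.2.1, st.2.2 + 1)

-- A's 'for j in range(256): if temp[j]==2: return tempIndex[j]' loop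
def leftRepeatScan (temp ti : List Int) : List Int → Int
  | [] => -1
  | j :: rest => if PySem.List.pyGetD temp j 0 = 2 then PySem.List.pyGetD ti j 0 else leftRepeatScan temp ti rest

def leftRepeatChar (s : String) : Int :=
  let st := s.toList.foldl leftRepeatStep (List.replicate 256 0, List.replicate 256 (-1), 0)
  leftRepeatScan st.1 st.2.1 (PySem.List.pyRange 0 256 1)

-- ===== PORT B =====
-- B's 'for c in sorted(set(s))' loop with its early return
def leftRepeatProbe (s : String) : List Char → Int
  | [] => -1
  | c :: rest =>
    let i := PySem.Str.find s (String.ofList [c])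
    let j := PySem.Str.findFrom s (String.ofList [c]) (i + 1) none
    if j ≠ -1 ∧ PySem.Str.findFrom s (String.ofList [c]) (j + 1) none = -1 then i
    else leftRepeatProbe s rest

def leftRepeatChar_alt (s : String) : Int :=
  leftRepeatProbe s (PySem.List.sorted (PySem.Set.ofList s.toList) (fun c => c) false)

-- ===== PRECONDITION & SPEC =====
def Spec_leftRepeatChar (s : String) (out : Int) : Prop := out = leftRepeatChar_alt s
instance (s : String) (out : Int) : Decidable (Spec_leftRepeatChar s out) := by unfold Spec_leftRepeatChar; infer_instance

-- ===== CLAIM (what is proved, stated in full; the proofs are below) =====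
def Claim_equal_leftRepeatChar : Prop := ∀ (s : String), Dom_leftRepeatChar s → Spec_leftRepeatChar s (leftRepeatChar s)

-- ===== LEMMAS AND PROOFS =====

-- the value of A's 'temp' table after processing the characters p
def tempOf (p : List Char) : List Int :=
  (List.range 256).map (fun j => ((min (p.count (Char.ofNat j)) 3 : Nat) : Int))

-- the value of A's 'tempIndex' table after processing the characters p
def tiOf (p : List Char) : List Int :=
  (List.range 256).map (fun j => if Char.ofNat j ∈ p then ((p.idxOf (Char.ofNat j) : Nat) : Int) else -1)

set_option maxRecDepth 8192 in
theorem tempOf_nil : tempOf [] = List.replicate 256 0 := by decide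

set_option maxRecDepth 8192 in
theorem tiOf_nil : tiOf [] = List.replicate 256 (-1) := by decide

set_option maxRecDepth 8192 in
theorem pyRange256 : PySem.List.pyRange 0 256 1 = (List.range 256).map (fun k : Nat => (k : Int)) := by decide

theorem valid_of_lt (k : Nat) (hk : k < 256) : Nat.isValidChar k := Or.inl (by omega)

theorem toNat_ofNat_lt (k : Nat) (hk : k < 256) : (Char.ofNat k).toNat = k := by
  rw [Char.toNat_ofNat, if_pos (valid_of_lt k hk)]

theorem ofNat_ne (k : Nat) (c : Char) (hk : k < 256) (hne : k ≠ c.toNat) : ¬ Char.ofNat k = c := by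
  intro h
  exact hne (by rw [← h, toNat_ofNat_lt k hk])

theorem getD_tempOf (p : List Char) (k : Nat) (hk : k < 256) :
    PySem.List.pyGetD (tempOf p) ((k : Nat) : Int) 0 = ((min (p.count (Char.ofNat k)) 3 : Nat) : Int) := by
  rw [PySem.List.pyGetD_natCast, tempOf, PySem.List.getD_map_range _ _ _ _ hk]

theorem getD_tiOf (p : List Char) (k : Nat) (hk : k < 256) :
    PySem.List.pyGetD (tiOf p) ((k : Nat) : Int) 0 =
      (if Char.ofNat k ∈ p then ((p.idxOf (Char.ofNat k) : Nat) : Int) else -1) := by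
  rw [PySem.List.pyGetD_natCast, tiOf, PySem.List.getD_map_range _ _ _ _ hk]

theorem count_append_singleton_self (p : List Char) (c : Char) :
    (p ++ [c]).count c = p.count c + 1 := by
  simp [List.count_append]

theorem tempOf_append (p : List Char) (c : Char) (hc : c.toNat < 256) :
    tempOf (p ++ [c]) =
      if p.count c ≤ 2 then
        (tempOf p).set c.toNat (((min (p.count c) 3 : Nat) : Int) + 1)
      else tempOf p := by
  apply List.ext_getElem
  · split <;> simp [tempOf]
  · intro k h1 h2
    have hk : k < 256 := by
      by_cases h : p.count c ≤ 2 <;> simpa [tempOf, h] using h1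
    by_cases hkc : k = c.toNat
    · subst hkc
      by_cases h : p.count c ≤ 2 <;>
        · simp [tempOf, h, List.getElem_set, hk, Char.ofNat_toNat, count_append_singleton_self]
          push_cast; omega
    · have hne := ofNat_ne k c hk hkc
      have hcc : ¬ c = Char.ofNat k := fun hh => hne hh.symm
      by_cases h : p.count c ≤ 2 <;>
        simp [tempOf, h, List.getElem_set, hk, Ne.symm hkc, List.count_singleton, hcc]

theorem tiOf_append (p : List Char) (c : Char) (hc : c.toNat < 256) :
    tiOf (p ++ [c]) =
      if c ∈ p then tiOf p else (tiOf p).set c.toNat ((p.length : Nat) : Int) := by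
  apply List.ext_getElem
  · split <;> simp [tiOf]
  · intro k h1 h2
    have hk : k < 256 := by
      by_cases h : c ∈ p <;> simpa [tiOf, h] using h1
    by_cases hkc : k = c.toNat
    · subst hkc
      by_cases h : c ∈ p <;>
        simp [tiOf, h, List.getElem_set, hk, Char.ofNat_toNat, List.idxOf_append]
    · have hne := ofNat_ne k c hk hkc
      have hmem : (Char.ofNat k ∈ p ++ [c]) ↔ Char.ofNat k ∈ p := by simp [hne]
      by_cases h : c ∈ p <;>
        by_cases hm : Char.ofNat k ∈ p <;>
          simp [tiOf, h, hm, List.getElem_set, hk, Ne.symm hkc, hmem, hne, List.idxOf_append]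

theorem stepA (p : List Char) (c : Char) (hc : c.toNat < 256) :
    leftRepeatStep (tempOf p, tiOf p, ((p.length : Nat) : Int)) c =
      (tempOf (p ++ [c]), tiOf (p ++ [c]), (((p ++ [c]).length : Nat) : Int)) := by
  have hg := getD_tempOf p c.toNat hc
  rw [Char.ofNat_toNat] at hg
  unfold leftRepeatStep
  simp only [hg]
  by_cases h2 : p.count c ≤ 2
  · rw [if_pos (by push_cast; omega)]
    by_cases h0 : p.count c = 0
    · have hnm : c ∉ p := List.count_eq_zero.mp h0
      rw [if_pos (by push_cast; omega)]
      simp only [PySem.List.pySetD_natCast]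
      rw [tempOf_append p c hc, tiOf_append p c hc, if_pos h2, if_neg hnm]
      simp
    · have hm : c ∈ p := by
        rcases List.count_pos_iff.mp (Nat.pos_of_ne_zero h0) with h; exact h
      rw [if_neg (by push_cast; omega)]
      simp only [PySem.List.pySetD_natCast]
      rw [tempOf_append p c hc, tiOf_append p c hc, if_pos h2, if_pos hm]
      simp
  · rw [if_neg (by push_cast; omega)]
    rw [tempOf_append p c hc, tiOf_append p c hc, if_neg h2,
      if_pos (List.count_pos_iff.mp (by omega))]
    simp

theorem foldA (l : List Char) : ∀ (p : List Char), (∀ c ∈ l, c.toNat < 256) →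
    l.foldl leftRepeatStep (tempOf p, tiOf p, ((p.length : Nat) : Int)) =
      (tempOf (p ++ l), tiOf (p ++ l), (((p ++ l).length : Nat) : Int)) := by
  induction l with
  | nil => intro p _; simp
  | cons c rest ih =>
    intro p hlt
    have hc : c.toNat < 256 := hlt c (List.mem_cons_self)
    rw [List.foldl_cons, stepA p c hc, ih (p ++ [c]) (fun x hx => hlt x (List.mem_cons_of_mem _ hx))]
    simp

theorem scan_spec (temp ti : List Int) (js : List Int) :
    leftRepeatScan temp ti js =
      match js.find? (fun j => PySem.List.pyGetD temp j 0 == 2) with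
      | some j => PySem.List.pyGetD ti j 0
      | none => -1 := by
  induction js with
  | nil => rfl
  | cons j rest ih =>
    by_cases h : PySem.List.pyGetD temp j 0 = 2
    · simp [leftRepeatScan, List.find?, h]
    · have hb : (PySem.List.pyGetD temp j 0 == 2) = false := by simp [h]
      simp [leftRepeatScan, List.find?, h, hb, ih]

theorem singleton_prefix_iff_head? (t : List Char) (m : Char) : [m] <+: t ↔ t.head? = some m := by
  cases t with
  | nil => simp
  | cons a r => simp [List.cons_prefix_cons, eq_comm]

theorem idxOf_eq_of (m : Char) (l : List Char) : ∀ (k : Nat), l[k]? = some m →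
    (∀ i < k, l[i]? ≠ some m) → l.idxOf m = k := by
  induction l with
  | nil => intro k h _; simp at h
  | cons a r ih =>
    intro k h hmin
    by_cases hac : a = m
    · subst hac
      cases k with
      | zero => simp
      | succ k' => exact absurd (by simp : (a :: r)[0]? = some a) (hmin 0 (Nat.succ_pos _))
    · cases k with
      | zero => simp at h; exact absurd h hac
      | succ k' =>
        have : r.idxOf m = k' := by
          apply ih k' (by simpa using h)
          intro i hi
          have := hmin (i + 1) (by omega)
          simpa using this
        simp [List.idxOf_cons, hac, this]

theorem find_singleton_of_mem (l : List Char) (m : Char) (hm : m ∈ l) :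
    PySem.Chars.find l [m] = ((l.idxOf m : Nat) : Int) := by
  have h0 : 0 ≤ PySem.Chars.find l [m] :=
    (PySem.Chars.find_nonneg_iff l [m]).mpr ((List.singleton_infix_iff m l).mpr hm)
  obtain ⟨hpre, hmin⟩ := PySem.Chars.find_spec h0
  rw [singleton_prefix_iff_head?, List.head?_drop] at hpre
  have hidx : l.idxOf m = (PySem.Chars.find l [m]).toNat := by
    apply idxOf_eq_of m l _ hpre
    intro i hi h
    exact hmin i hi (by rw [singleton_prefix_iff_head?, List.head?_drop]; exact h)
  rw [hidx, Int.toNat_of_nonneg h0]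

theorem find?_range_eq_some (p : Nat → Bool) (n k : Nat) (hk : k < n) (hp : p k = true)
    (hmin : ∀ j < k, p j = false) : (List.range n).find? p = some k := by
  rw [List.find?_eq_some_iff_append]
  refine ⟨hp, List.range k, (List.range (n - (k + 1))).map ((fun x => k + x) ∘ Nat.succ), ?_, ?_⟩
  · have h2 : n = k + ((n - (k + 1)) + 1) := by omega
    conv_lhs => rw [h2]
    rw [List.range_add, List.range_succ_eq_map]
    simp [List.map_map]
  · intro a ha
    simp [hmin a (List.mem_range.mp ha)]

theorem find?_range_eq_none (p : Nat → Bool) (n : Nat) (hall : ∀ j < n, p j = false) :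
    (List.range n).find? p = none := by
  rw [List.find?_eq_none]
  intro x hx
  simp [hall x (List.mem_range.mp hx)]

theorem find?_congr_mem {α : Type} (l : List α) (p q : α → Bool) (h : ∀ x ∈ l, p x = q x) :
    l.find? p = l.find? q := by
  induction l with
  | nil => rfl
  | cons a r ih =>
    have ha := h a (List.mem_cons_self)
    simp only [List.find?, ha]
    cases q a
    · exact ih (fun x hx => h x (List.mem_cons_of_mem _ hx))
    · rfl

theorem find?_map_castInt (l : List Nat) (p : Int → Bool) :
    (l.map (fun k : Nat => (k : Int))).find? p
      = Option.map (fun k : Nat => (k : Int)) (l.find? (fun k => p (k : Int))) := by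
  induction l with
  | nil => rfl
  | cons a r ih =>
    simp only [List.map_cons, List.find?_cons]
    cases hpa : p ((a : Nat) : Int) <;> simp [hpa, ih]

theorem char_toNat_le {a b : Char} (h : a ≤ b) : a.toNat ≤ b.toNat := Fin.mk_le_mk.mp h

-- after the first occurrence of c there remain count-1 occurrences
theorem count_drop_idxOf (c : Char) : ∀ (l : List Char), c ∈ l →
    l.count c = (l.drop (l.idxOf c + 1)).count c + 1 := by
  intro l
  induction l with
  | nil => intro h; simp at h
  | cons a r ih =>
    intro h
    by_cases hac : a = c
    · subst hac; simp [List.count_cons_self]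
    · have hr : c ∈ r := by
        rcases List.mem_cons.mp h with h1 | h1
        · exact absurd h1.symm hac
        · exact h1
      simp [List.count_cons_of_ne (fun hh => hac hh.symm) , List.idxOf_cons, hac, ih hr]

-- B's three-probe condition holds exactly when c occurs exactly twice in l
theorem probe_cond_iff (l : List Char) (c : Char) (hm : c ∈ l) :
    ((PySem.Chars.findFrom l [c] (PySem.Chars.find l [c] + 1) none ≠ -1 ∧
      PySem.Chars.findFrom l [c]
        (PySem.Chars.findFrom l [c] (PySem.Chars.find l [c] + 1) none + 1) none = -1)
      ↔ l.count c = 2) := by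
  have hi := find_singleton_of_mem l c hm
  have hidx : l.idxOf c < l.length := List.idxOf_lt_length_of_mem hm
  set n := l.idxOf c with hn
  have hi1 : PySem.Chars.find l [c] + 1 = ((n + 1 : Nat) : Int) := by rw [hi]; push_cast; ring
  have hk1 : n + 1 ≤ l.length := by omega
  have hff1 := PySem.Chars.findFrom_natCast l [c] (n + 1) hk1
  set d1 := l.drop (n + 1) with hd1
  have hcnt1 : l.count c = d1.count c + 1 := count_drop_idxOf c l hm
  by_cases hmem1 : c ∈ d1
  · -- a second occurrence exists
    have hfd1 := find_singleton_of_mem d1 c hmem1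
    have htlt : d1.idxOf c < d1.length := List.idxOf_lt_length_of_mem hmem1
    set t := d1.idxOf c with ht
    have hd1len : d1.length = l.length - (n + 1) := by simp [hd1]
    have hne : PySem.Chars.find d1 [c] ≠ -1 := by rw [hfd1]; omega
    have hj : PySem.Chars.findFrom l [c] (PySem.Chars.find l [c] + 1) none
        = ((n + 1 + t : Nat) : Int) := by
      rw [hi1, hff1, if_neg hne, hfd1]; push_cast; ring
    have hj1 : PySem.Chars.findFrom l [c] (PySem.Chars.find l [c] + 1) none + 1
        = ((n + 1 + t + 1 : Nat) : Int) := by rw [hj]; push_cast; ring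
    have hk2 : n + 1 + t + 1 ≤ l.length := by omega
    have hff2 := PySem.Chars.findFrom_natCast l [c] (n + 1 + t + 1) hk2
    have hdrop2 : l.drop (n + 1 + t + 1) = d1.drop (t + 1) := by
      rw [hd1, List.drop_drop]; ring_nf
    have hcnt2 : d1.count c = (d1.drop (t + 1)).count c + 1 := count_drop_idxOf c d1 hmem1
    constructor
    · rintro ⟨_, h3⟩
      rw [hj1, hff2] at h3
      have hnot : ¬ [c] <:+: l.drop (n + 1 + t + 1) := by
        by_contra habs
        have := (PySem.Chars.find_ne_neg_one_iff _ _).mpr habs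
        split at h3
        · exact this (by assumption)
        · have hge : 0 ≤ PySem.Chars.find (l.drop (n + 1 + t + 1)) [c] :=
            (PySem.Chars.find_nonneg_iff _ _).mpr habs
          omega
      have : c ∉ d1.drop (t + 1) := by
        rw [← hdrop2]; exact fun hmm => hnot ((List.singleton_infix_iff c _).mpr hmm)
      have : (d1.drop (t + 1)).count c = 0 := List.count_eq_zero.mpr this
      omega
    · intro h2
      have hz : (d1.drop (t + 1)).count c = 0 := by omega
      have hnm : c ∉ d1.drop (t + 1) := List.count_eq_zero.mp hz
      refine ⟨by rw [hj]; intro habs; omega, ?_⟩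
      rw [hj1, hff2, if_pos]
      rw [PySem.Chars.find_eq_neg_one_iff, hdrop2]
      exact fun habs => hnm ((List.singleton_infix_iff c _).mp habs)
  · -- only one occurrence: second probe already fails
    have hz : d1.count c = 0 := List.count_eq_zero.mpr hmem1
    have hfd1 : PySem.Chars.find d1 [c] = -1 := by
      rw [PySem.Chars.find_eq_neg_one_iff]
      exact fun habs => hmem1 ((List.singleton_infix_iff c _).mp habs)
    have hj : PySem.Chars.findFrom l [c] (PySem.Chars.find l [c] + 1) none = -1 := by
      rw [hi1, hff1, if_pos hfd1]
    constructor
    · rintro ⟨h1, _⟩; exact absurd hj h1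
    · intro h2; omega

-- B's candidate loop is a find? over the candidate list
theorem probe_spec (s : String) (l : List Char) (hl : l = s.toList) :
    ∀ (cs : List Char), (∀ c ∈ cs, c ∈ l) →
    leftRepeatProbe s cs =
      match cs.find? (fun c => l.count c == 2) with
      | some c => ((l.idxOf c : Nat) : Int)
      | none => -1 := by
  intro cs
  induction cs with
  | nil => intro _; rfl
  | cons c rest ih =>
    intro hmem
    have hc : c ∈ l := hmem c (List.mem_cons_self)
    have hfind : PySem.Str.find s (String.ofList [c]) = PySem.Chars.find l [c] := by
      simp [PySem.Str.find_eq, hl]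
    have hff : ∀ st, PySem.Str.findFrom s (String.ofList [c]) st none
        = PySem.Chars.findFrom l [c] st none := by
      intro st; simp [PySem.Str.findFrom_eq, hl]
    show (if _ ∧ _ then _ else _) = _
    rw [hfind, hff, hff]
    by_cases h2 : l.count c = 2
    · rw [if_pos ((probe_cond_iff l c hc).mpr h2)]
      simp only [List.find?_cons, h2]
      simp [find_singleton_of_mem l c hc]
    · rw [if_neg (fun habs => h2 ((probe_cond_iff l c hc).mp habs))]
      have hb : (l.count c == 2) = false := by simp [h2]
      simp only [List.find?_cons, hb]
      exact ih (fun x hx => hmem x (List.mem_cons_of_mem _ hx))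

-- first hit of find? on the ascending distinct list = min? of the filtered set
theorem find?_sorted_eq_min?_filter (l : List Char) (p : Char → Bool) :
    (PySem.List.sorted (PySem.Set.ofList l) (fun c => c) false).find? p
      = PySem.List.min? ((PySem.Set.ofList l).filter p) (fun c => c) := by
  set sl := PySem.List.sorted (PySem.Set.ofList l) (fun c => c) false with hsl
  have hperm : sl.Perm (PySem.Set.ofList l) := PySem.List.sorted_perm _ _ _
  rcases hf : sl.find? p with _ | m
  · have hall := List.find?_eq_none.mp hf
    have hfil : (PySem.Set.ofList l).filter p = [] := by
      rw [List.filter_eq_nil_iff]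
      intro x hx
      have : x ∈ sl := hperm.mem_iff.mpr hx
      simpa using hall x this
    exact ((PySem.List.min?_eq_none_iff ((PySem.Set.ofList l).filter p) (fun c : Char => c)).mpr hfil).symm
  · obtain ⟨hpm, as, bs, hsplit, has⟩ := List.find?_eq_some_iff_append.mp hf
    have hmsl : m ∈ sl := by rw [hsplit]; simp
    have hmfil : m ∈ (PySem.Set.ofList l).filter p :=
      List.mem_filter.mpr ⟨hperm.mem_iff.mp hmsl, hpm⟩
    rcases hmin : PySem.List.min? ((PySem.Set.ofList l).filter p) (fun c => c) with _ | m'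
    · rw [PySem.List.min?_eq_none_iff] at hmin
      rw [hmin] at hmfil
      simp at hmfil
    · have hm'fil := PySem.List.min?_mem hmin
      have hm'le : m' ≤ m := PySem.List.min?_isMin hmin m hmfil
      have hpm' : p m' = true := (List.mem_filter.mp hm'fil).2
      have hm'sl : m' ∈ sl := hperm.mem_iff.mpr (List.mem_filter.mp hm'fil).1
      have hpw : sl.Pairwise (· < ·) := PySem.List.sorted_ofList_pairwise_lt l
      rw [hsplit] at hm'sl hpw
      rcases List.mem_append.mp hm'sl with h1 | h1
      · exact absurd hpm' (by simpa using has m' h1)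
      · rcases List.mem_cons.mp h1 with h1 | h1
        · rw [h1]
        · have hlt : m < m' := List.rel_of_pairwise_cons (List.pairwise_append.mp hpw).2.1 h1
          exact absurd hm'le (not_le.mpr hlt)

-- ===== VERDICT (by name: the statement is the Claim_ definition above) =====
set_option maxRecDepth 8192 in
theorem leftRepeatChar_spec : Claim_equal_leftRepeatChar := by
  intro s hdom
  show leftRepeatChar s = leftRepeatChar_alt s
  have hlt : ∀ c ∈ s.toList, c.toNat < 256 := by
    intro c hc
    have := (List.all_eq_true.mp hdom) c hc
    simp [pvDomChar] at this
    omega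
  set l := s.toList with hl
  -- A reduces to a find? over the 256 possible ords
  have hA : leftRepeatChar s =
      match (List.range 256).find? (fun k => min (l.count (Char.ofNat k)) 3 == 2) with
      | some k => (if Char.ofNat k ∈ l then ((l.idxOf (Char.ofNat k) : Nat) : Int) else -1)
      | none => -1 := by
    unfold leftRepeatChar
    rw [← tempOf_nil, ← tiOf_nil]
    have hfold := foldA l [] hlt
    simp only [List.nil_append, List.length_nil, Nat.cast_zero] at hfold
    rw [hfold, scan_spec, pyRange256, find?_map_castInt]
    rw [find?_congr_mem (List.range 256) _ (fun k => min (l.count (Char.ofNat k)) 3 == 2) ?_]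
    · rcases hfind : (List.range 256).find? (fun k => min (l.count (Char.ofNat k)) 3 == 2) with _ | k
      · rfl
      · have hk : k < 256 := List.mem_range.mp (List.mem_of_find?_eq_some hfind)
        simp only [Option.map_some]
        rw [getD_tiOf l k hk]
    · intro k hk
      have hk' := List.mem_range.mp hk
      simp only [Function.comp_apply]
      rw [getD_tempOf l k hk']
      by_cases h : min (l.count (Char.ofNat k)) 3 = 2
      · simp [h]
      · have h2 : ¬ (((min (l.count (Char.ofNat k)) 3 : Nat) : Int) = 2) := by omega
        push_cast at h2
        simp [h, h2]
  -- B reduces to min? over the distinct characters occurring exactly twice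
  have hB : leftRepeatChar_alt s =
      match PySem.List.min? ((PySem.Set.ofList l).filter (fun c => l.count c == 2)) (fun c => c) with
      | some m => ((l.idxOf m : Nat) : Int)
      | none => -1 := by
    unfold leftRepeatChar_alt
    rw [probe_spec s l hl _ (fun c hc => by
      have := (PySem.List.sorted_perm (PySem.Set.ofList s.toList) (fun c : Char => c) false).mem_iff.mp hc
      exact (PySem.Set.mem_ofList _ _).mp this)]
    rw [← hl, find?_sorted_eq_min?_filter l (fun c => l.count c == 2)]
  rw [hA, hB]
  rcases hmin : PySem.List.min? ((PySem.Set.ofList l).filter (fun c => l.count c == 2)) (fun c => c)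
      with _ | m
  · -- no character occurs exactly twice: both sides are -1
    have hnone : (List.range 256).find? (fun k => min (l.count (Char.ofNat k)) 3 == 2) = none := by
      apply find?_range_eq_none
      intro j hj
      simp only [beq_eq_false_iff_ne, ne_eq]
      intro habs
      have hcj : l.count (Char.ofNat j) = 2 := by omega
      have hmem : Char.ofNat j ∈ (PySem.Set.ofList l).filter (fun c => l.count c == 2) := by
        rw [List.mem_filter]
        exact ⟨(PySem.Set.mem_ofList _ _).mpr (List.count_pos_iff.mp (by omega)), by simp [hcj]⟩
      rw [PySem.List.min?_eq_none_iff] at hmin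
      simp [hmin] at hmem
    rw [hnone]
  · -- m is the smallest character occurring exactly twice; both sides are its first index
    have hmemf := PySem.List.min?_mem hmin
    have hml : m ∈ l := (PySem.Set.mem_ofList _ _).mp (List.mem_filter.mp hmemf).1
    have hm2 : l.count m = 2 := by
      have := (List.mem_filter.mp hmemf).2
      simpa using this
    have hmle := PySem.List.min?_isMin hmin
    have hm256 : m.toNat < 256 := hlt m hml
    have hsome : (List.range 256).find? (fun k => min (l.count (Char.ofNat k)) 3 == 2) =
        some m.toNat := by
      apply find?_range_eq_some _ _ _ hm256
      · simp [Char.ofNat_toNat, hm2]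
      · intro j hj
        simp only [beq_eq_false_iff_ne, ne_eq]
        intro habs
        have hj256 : j < 256 := by omega
        have hcj : l.count (Char.ofNat j) = 2 := by omega
        have hjm : Char.ofNat j ∈ (PySem.Set.ofList l).filter (fun c => l.count c == 2) := by
          rw [List.mem_filter]
          exact ⟨(PySem.Set.mem_ofList _ _).mpr (List.count_pos_iff.mp (by omega)), by simp [hcj]⟩
        have hle : m.toNat ≤ (Char.ofNat j).toNat := char_toNat_le (hmle _ hjm)
        rw [toNat_ofNat_lt j hj256] at hle
        omega
    rw [hsome]
    simp only [Char.ofNat_toNat]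
    rw [if_pos hml]
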